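-- pv_equiv track=rewrite | github.com/YosysHQ/icestorm | icefuzz/tests/rgb_drv_cbit/fuzz_rgb_drv_cbit.py | get_param_value
-- ===== SOURCE A (Python) =====
-- def get_param_value(param_name, param_size, fuzz_bit):
--     param = "\"0b";
--     #In the RGB driver, once bit i of a current parameter is set i-1..0 must also be set
--     is_high = False
--     for i in range(param_size - 1, -1, -1):
--         if fuzz_bit == param_name + "_" + str(i) or is_high:
--             param += '1'
--             is_high = True
--         else:
--             param += '0'
--     param += "\""
--     return param
-- ===== SOURCE B (Python) =====
-- def get_param_value(param_name, param_size, fuzz_bit):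
--     prefix = param_name + "_"
--     idx = None
--     if fuzz_bit.startswith(prefix):
--         suffix = fuzz_bit[len(prefix):]
--         # accept only the canonical decimal form str(i): digits, no leading zero
--         if suffix.isdigit() and (suffix == "0" or suffix[0] != "0"):
--             v = 0
--             for ch in suffix:
--                 v = v * 10 + (ord(ch) - 48)
--             if v < param_size:
--                 idx = v
--     if idx is None:
--         return '"0b' + '0' * param_size + '"'
--     return '"0b' + '0' * (param_size - 1 - idx) + '1' * (idx + 1) + '"'
-- ===== Notes on version B (the rewrite author's own statement) =====
-- stated objective: faster
-- what changed: Instead of looping over all param_size candidate bit names and comparing fuzz_bit against each, B parses the bit index once (prefix check plus canonical-decimal suffix validation) and builds the '0'*k + '1'*(idx+1) thermometer string directly.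
import Mathlib
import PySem

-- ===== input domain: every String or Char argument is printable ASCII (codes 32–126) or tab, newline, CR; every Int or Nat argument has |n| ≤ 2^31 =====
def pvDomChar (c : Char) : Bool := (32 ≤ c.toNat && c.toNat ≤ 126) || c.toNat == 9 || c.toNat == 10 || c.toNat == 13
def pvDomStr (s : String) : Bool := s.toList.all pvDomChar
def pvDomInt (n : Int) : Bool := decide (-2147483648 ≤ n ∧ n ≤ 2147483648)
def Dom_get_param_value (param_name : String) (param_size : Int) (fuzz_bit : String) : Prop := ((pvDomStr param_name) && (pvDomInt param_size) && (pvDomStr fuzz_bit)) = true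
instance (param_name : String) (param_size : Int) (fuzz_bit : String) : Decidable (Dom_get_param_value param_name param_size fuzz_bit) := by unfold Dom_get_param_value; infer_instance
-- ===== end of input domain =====

-- B replaces A's per-bit string-comparison loop by a single parse of the bit index and direct
-- construction of the thermometer code (objective: faster at large param_size).


-- ===== PORT A =====
-- one iteration of A's loop body (strings handled as List Char; String.ofList at the boundary)
def gpvStep (param_name fuzz_bit : String) (st : List Char × Bool) (i : Int) : List Char × Bool :=
  if fuzz_bit.toList = param_name.toList ++ '_' :: PySem.Int.toChars i ∨ st.2 = true then
    (st.1 ++ ['1'], true)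
  else
    (st.1 ++ ['0'], st.2)

def get_param_value (param_name : String) (param_size : Int) (fuzz_bit : String) : String :=
  -- param = "\"0b"; is_high = False; for i in range(param_size-1, -1, -1): …; param += "\""
  let st := (PySem.List.pyRange (param_size - 1) (-1) (-1)).foldl
              (gpvStep param_name fuzz_bit) (['"', '0', 'b'], false)
  String.ofList (st.1 ++ ['"'])

-- ===== PORT B =====
-- v = 0; for ch in suffix: v = v*10 + (ord(ch) - 48)
def gpvParse (s : List Char) : Nat := s.foldl (fun a c => 10 * a + (c.toNat - 48)) 0

-- suffix.isdigit() and (suffix == "0" or suffix[0] != "0")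
def gpvCanon (s : List Char) : Bool :=
  PySem.Chars.strIsdigit s && (s == ['0'] || s.head? != some '0')

def get_param_value_alt (param_name : String) (param_size : Int) (fuzz_bit : String) : String :=
  let pre := param_name.toList ++ ['_']
  let fz := fuzz_bit.toList
  let idx : Option Nat :=
    if PySem.Chars.startswith fz pre then
      let suf := fz.drop pre.length   -- fuzz_bit[len(prefix):], exact: len(prefix) ≥ 0
      if gpvCanon suf then
        let v := gpvParse suf
        if (v : Int) < param_size then some v else none
      else none
    else none
  match idx with
  | none => String.ofList ('"' :: '0' :: 'b' :: (List.replicate param_size.toNat '0' ++ ['"']))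
  | some v => String.ofList ('"' :: '0' :: 'b' ::
      (List.replicate (param_size - 1 - v).toNat '0' ++ List.replicate (v + 1) '1' ++ ['"']))

-- ===== PRECONDITION & SPEC =====
def Spec_get_param_value (param_name : String) (param_size : Int) (fuzz_bit : String) (out : String) : Prop := out = get_param_value_alt param_name param_size fuzz_bit
instance (param_name : String) (param_size : Int) (fuzz_bit : String) (out : String) : Decidable (Spec_get_param_value param_name param_size fuzz_bit out) := by unfold Spec_get_param_value; infer_instance

-- ===== CLAIM (what is proved, stated in full; the proofs are below) =====
def Claim_equal_get_param_value : Prop := ∀ (param_name : String) (param_size : Int) (fuzz_bit : String), Dom_get_param_value param_name param_size fuzz_bit → Spec_get_param_value param_name param_size fuzz_bit (get_param_value param_name param_size fuzz_bit)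

-- ===== LEMMAS AND PROOFS =====

theorem gpv_isdigit_toNat {c : Char} (h : PySem.Chars.isdigit c = true) :
    48 ≤ c.toNat ∧ c.toNat ≤ 57 := by
  simp [PySem.Chars.isdigit, Char.le_def, UInt32.le_iff_toNat_le] at h
  exact h

theorem gpv_digitChar_toNat {d : Nat} (h : d < 10) : (Nat.digitChar d).toNat = 48 + d := by
  interval_cases d <;> decide

theorem gpv_digitChar_val {c : Char} (h : PySem.Chars.isdigit c = true) :
    Nat.digitChar (c.toNat - 48) = c := by
  obtain ⟨h1, h2⟩ := gpv_isdigit_toNat h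
  have hd : c.toNat - 48 < 10 := by omega
  have ht := gpv_digitChar_toNat hd
  have : (Nat.digitChar (c.toNat - 48)).toNat = c.toNat := by omega
  exact Char.ext_iff.mpr (UInt32.toNat_inj.mp this)

theorem gpvParse_append (l : List Char) (c : Char) :
    gpvParse (l ++ [c]) = 10 * gpvParse l + (c.toNat - 48) := by
  simp [gpvParse]

theorem gpvParse_toDigits (m : Nat) : gpvParse (Nat.toDigits 10 m) = m := by
  induction m using Nat.strong_induction_on with
  | _ m ih =>
    by_cases h : m < 10
    · rw [Nat.toDigits_of_lt_base h]
      have := gpv_digitChar_toNat h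
      simp [gpvParse]
      omega
    · rw [Nat.toDigits_of_base_le (by norm_num) (le_of_not_gt h), gpvParse_append,
          ih (m / 10) (by omega), gpv_digitChar_toNat (Nat.mod_lt _ (by norm_num))]
      omega

theorem gpv_digitChar_isdigit {d : Nat} (h : d < 10) :
    PySem.Chars.isdigit (Nat.digitChar d) = true := by
  interval_cases d <;> decide

theorem gpv_toDigits_digits (m : Nat) :
    ∀ c ∈ Nat.toDigits 10 m, PySem.Chars.isdigit c = true := by
  induction m using Nat.strong_induction_on with
  | _ m ih =>
    intro c hc
    by_cases h : m < 10
    · rw [Nat.toDigits_of_lt_base h] at hc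
      simp at hc
      subst hc
      exact gpv_digitChar_isdigit h
    · rw [Nat.toDigits_of_base_le (by norm_num) (le_of_not_gt h)] at hc
      rcases List.mem_append.mp hc with h1 | h1
      · exact ih (m / 10) (by omega) c h1
      · simp at h1
        subst h1
        exact gpv_digitChar_isdigit (Nat.mod_lt _ (by norm_num))

theorem gpv_toDigits_ne_nil (m : Nat) : Nat.toDigits 10 m ≠ [] :=
  List.ne_nil_of_length_pos Nat.length_toDigits_pos

theorem gpv_toDigits_head (m : Nat) (h : 0 < m) :
    (Nat.toDigits 10 m).head? ≠ some '0' := by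
  induction m using Nat.strong_induction_on with
  | _ m ih =>
    by_cases hm : m < 10
    · rw [Nat.toDigits_of_lt_base hm]
      interval_cases m <;> decide
    · rw [Nat.toDigits_of_base_le (by norm_num) (le_of_not_gt hm),
          List.head?_append_of_ne_nil _ (gpv_toDigits_ne_nil (m / 10))]
      exact ih (m / 10) (by omega) (by omega)

theorem gpvCanon_toDigits (m : Nat) : gpvCanon (Nat.toDigits 10 m) = true := by
  have hne := gpv_toDigits_ne_nil m
  have hdig := gpv_toDigits_digits m
  simp [gpvCanon, PySem.Chars.strIsdigit, hne, List.all_eq_true]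
  refine ⟨hdig, ?_⟩
  by_cases h : m = 0
  · subst h; exact Or.inl (Nat.toDigits_zero 10)
  · exact Or.inr (gpv_toDigits_head m (by omega))

theorem gpvParse_pos (s : List Char) (hd : ∀ c ∈ s, PySem.Chars.isdigit c = true)
    (hne : s ≠ []) (hh : s.head? ≠ some '0') : 1 ≤ gpvParse s := by
  induction s using List.reverseRecOn with
  | nil => exact absurd rfl hne
  | append_singleton l c ih =>
    rw [gpvParse_append]
    rcases l with _ | ⟨x, xs⟩
    · have hc : PySem.Chars.isdigit c = true := hd c (by simp)
      obtain ⟨h1, h2⟩ := gpv_isdigit_toNat hc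
      have hc0 : c ≠ '0' := by
        intro hc0; subst hc0; simp at hh
      have : c.toNat ≠ 48 := by
        intro h48
        exact hc0 (Char.ext_iff.mpr (UInt32.toNat_inj.mp (show c.toNat = '0'.toNat from h48)))
      omega
    · have := ih (fun d hdm => hd d (List.mem_append.mpr (Or.inl hdm))) (by simp)
        (by simpa using hh)
      omega

theorem gpv_toDigits_parse (s : List Char) (h : gpvCanon s = true) :
    Nat.toDigits 10 (gpvParse s) = s := by
  induction s using List.reverseRecOn with
  | nil => simp [gpvCanon, PySem.Chars.strIsdigit] at h
  | append_singleton l c ih =>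
    simp only [gpvCanon, PySem.Chars.strIsdigit, Bool.and_eq_true, Bool.or_eq_true,
      List.all_eq_true, beq_iff_eq, bne_iff_ne, ne_eq] at h
    obtain ⟨⟨-, hdig⟩, hcanon⟩ := h
    have hc : PySem.Chars.isdigit c = true := hdig c (by simp)
    obtain ⟨h1, h2⟩ := gpv_isdigit_toNat hc
    rcases l with _ | ⟨x, xs⟩
    · rw [gpvParse_append]
      simp [gpvParse]
      rw [Nat.toDigits_of_lt_base (by omega)]
      rw [gpv_digitChar_val hc]
    · have hh : (x :: xs ++ [c]).head? ≠ some '0' := by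
        rcases hcanon with hc1 | hc2
        · exact absurd hc1 (by simp)
        · simpa using hc2
      have hdigl : ∀ d ∈ x :: xs, PySem.Chars.isdigit d = true :=
        fun d hdm => hdig d (List.mem_append.mpr (Or.inl hdm))
      have hcanl : gpvCanon (x :: xs) = true := by
        simp only [gpvCanon, PySem.Chars.strIsdigit, Bool.and_eq_true, Bool.or_eq_true,
          List.all_eq_true, beq_iff_eq, bne_iff_ne, ne_eq]
        exact ⟨⟨by simp, hdigl⟩, Or.inr (by simpa using hh)⟩
      have hpos : 1 ≤ gpvParse (x :: xs) :=
        gpvParse_pos _ hdigl (by simp) (by simpa using hh)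
      rw [gpvParse_append]
      have h10 : 10 ≤ 10 * gpvParse (x :: xs) + (c.toNat - 48) := by omega
      rw [Nat.toDigits_of_base_le (by norm_num) h10]
      have hdiv : (10 * gpvParse (x :: xs) + (c.toNat - 48)) / 10 = gpvParse (x :: xs) := by omega
      have hmod : (10 * gpvParse (x :: xs) + (c.toNat - 48)) % 10 = c.toNat - 48 := by omega
      rw [hdiv, hmod, ih hcanl, gpv_digitChar_val hc]

-- loop: once is_high, everything is '1'
theorem gpv_loop_ones (nm fb : String) (l : List Int) (acc : List Char) :
    l.foldl (gpvStep nm fb) (acc, true) = (acc ++ List.replicate l.length '1', true) := by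
  induction l generalizing acc with
  | nil => simp
  | cons i t ih =>
    simp only [List.foldl_cons, gpvStep, or_true, if_true, ih, List.length_cons]
    simp [List.replicate_succ, List.append_assoc]

-- loop: no index in the list matches → all '0'
theorem gpv_loop_zeros (nm fb : String) (l : List Int) (acc : List Char)
    (h : ∀ i ∈ l, ¬ fb.toList = nm.toList ++ '_' :: PySem.Int.toChars i) :
    l.foldl (gpvStep nm fb) (acc, false) = (acc ++ List.replicate l.length '0', false) := by
  induction l generalizing acc with
  | nil => simp
  | cons i t ih =>
    have hi := h i (by simp)
    simp only [List.foldl_cons, gpvStep, hi, false_or, Bool.false_eq_true, if_false]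
    rw [ih _ (fun j hj => h j (by simp [hj]))]
    simp [List.replicate_succ, List.append_assoc]

-- loop over the full countdown with a unique matching index v
theorem gpv_loop_match (nm fb : String) (n : Int) (v : Nat) (acc : List Char)
    (hv : (v : Int) < n)
    (hP : fb.toList = nm.toList ++ '_' :: PySem.Int.toChars (v : Int))
    (uniq : ∀ i : Int, 0 ≤ i → fb.toList = nm.toList ++ '_' :: PySem.Int.toChars i → i = (v : Int)) :
    (PySem.List.pyRange (n - 1) (-1) (-1)).foldl (gpvStep nm fb) (acc, false) =
      (acc ++ (List.replicate (n - 1 - v).toNat '0' ++ List.replicate (v + 1) '1'), true) := by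
  have hrange : PySem.List.pyRange (n - 1) (-1) (-1) =
      (PySem.List.pyRange ((v : Int) + 1) n 1).reverse ++ PySem.List.pyRange (v : Int) (-1) (-1) := by
    rw [PySem.List.pyRange_neg_one_eq_reverse]
    have h1 : (-1 : Int) + 1 = 0 := by norm_num
    have h2 : n - 1 + 1 = n := by ring
    rw [h1, h2, PySem.List.pyRange_one_append 0 ((v : Int) + 1) n (by omega) (by omega),
        List.reverse_append]
    congr 1
    rw [PySem.List.pyRange_neg_one_eq_reverse]
    norm_num
  rw [hrange, List.foldl_append]
  rw [gpv_loop_zeros nm fb _ acc (by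
    intro i hi hPi
    rw [List.mem_reverse, PySem.List.mem_pyRange_one] at hi
    have := uniq i (by omega) hPi
    omega)]
  rw [PySem.List.pyRange_neg_one_cons (by omega : (-1 : Int) < (v : Int))]
  simp only [List.foldl_cons, gpvStep, hP, true_or, if_true]
  rw [gpv_loop_ones]
  have hl1 : ((PySem.List.pyRange ((v : Int) + 1) n 1).reverse).length = (n - 1 - v).toNat := by
    rw [List.length_reverse, PySem.List.length_pyRange_one]
    congr 1
    ring
  have hl2 : (PySem.List.pyRange ((v : Int) - 1) (-1) (-1)).length = v := by
    rw [PySem.List.length_pyRange_neg_one]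
    omega
  rw [hl1, hl2]
  simp [List.replicate_succ, List.append_assoc]

theorem gpv_match_iff (nm fb : String) (i : Int) (hi : 0 ≤ i) :
    fb.toList = nm.toList ++ '_' :: PySem.Int.toChars i ↔
      (PySem.Chars.startswith fb.toList (nm.toList ++ ['_']) = true ∧
       gpvCanon (fb.toList.drop (nm.toList ++ ['_']).length) = true ∧
       (gpvParse (fb.toList.drop (nm.toList ++ ['_']).length) : Int) = i) := by
  have htc : PySem.Int.toChars i = Nat.toDigits 10 i.toNat := by
    simp [PySem.Int.toChars, not_lt.mpr hi]
  constructor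
  · intro hP
    have hfz : fb.toList = (nm.toList ++ ['_']) ++ Nat.toDigits 10 i.toNat := by
      rw [hP, htc]; simp
    have hdrop : fb.toList.drop (nm.toList ++ ['_']).length = Nat.toDigits 10 i.toNat := by
      rw [hfz, List.drop_left]
    refine ⟨?_, ?_, ?_⟩
    · rw [PySem.Chars.startswith_iff, hfz]; exact ⟨_, rfl⟩
    · rw [hdrop]; exact gpvCanon_toDigits _
    · rw [hdrop, gpvParse_toDigits]; omega
  · rintro ⟨hs, hc, hp⟩
    obtain ⟨t, ht⟩ := (PySem.Chars.startswith_iff _ _).mp hs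
    have hdrop : fb.toList.drop (nm.toList ++ ['_']).length = t := by
      rw [← ht, List.drop_left]
    rw [hdrop] at hc hp
    have hpt : gpvParse t = i.toNat := by omega
    have hts : t = Nat.toDigits 10 i.toNat := by rw [← hpt, gpv_toDigits_parse t hc]
    rw [← ht, hts, htc]
    simp

theorem gpv_nomatch (nm fb : String) (n : Int) (acc : List Char)
    (h : ∀ i : Int, 0 ≤ i → i < n → fb.toList ≠ nm.toList ++ '_' :: PySem.Int.toChars i) :
    (PySem.List.pyRange (n - 1) (-1) (-1)).foldl (gpvStep nm fb) (acc, false) =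
      (acc ++ List.replicate n.toNat '0', false) := by
  rw [gpv_loop_zeros nm fb _ acc (by
    intro i hi
    rw [PySem.List.mem_pyRange_neg_one] at hi
    exact h i (by omega) (by omega))]
  rw [PySem.List.length_pyRange_neg_one]
  have h2 : n - 1 - -1 = n := by ring
  rw [h2]

theorem gpv_final (nm : String) (n : Int) (fb : String) :
    get_param_value nm n fb = get_param_value_alt nm n fb := by
  unfold get_param_value get_param_value_alt
  by_cases hs : PySem.Chars.startswith fb.toList (nm.toList ++ ['_']) = true
  · by_cases hc : gpvCanon (fb.toList.drop (nm.toList ++ ['_']).length) = true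
    · by_cases hv : ((gpvParse (fb.toList.drop (nm.toList ++ ['_']).length) : Int) < n)
      · have hP : fb.toList = nm.toList ++ '_' ::
            PySem.Int.toChars ((gpvParse (fb.toList.drop (nm.toList ++ ['_']).length) : Int)) :=
          (gpv_match_iff nm fb _ (by positivity)).mpr ⟨hs, hc, rfl⟩
        have uniq : ∀ i : Int, 0 ≤ i →
            fb.toList = nm.toList ++ '_' :: PySem.Int.toChars i →
            i = ((gpvParse (fb.toList.drop (nm.toList ++ ['_']).length) : Int)) := by
          intro i h0 hPi
          obtain ⟨-, -, hp⟩ := (gpv_match_iff nm fb i h0).mp hPi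
          exact hp.symm
        simp only [hs, hc, hv, if_pos]
        rw [gpv_loop_match nm fb n _ ['"', '0', 'b'] hv hP uniq]
        simp [List.append_assoc]
      · have hno : ∀ i : Int, 0 ≤ i → i < n →
            fb.toList ≠ nm.toList ++ '_' :: PySem.Int.toChars i := by
          intro i h0 hin hPi
          obtain ⟨-, -, hp⟩ := (gpv_match_iff nm fb i h0).mp hPi
          rw [hp] at hv
          exact hv hin
        simp only [hs, hc, hv, if_true]
        rw [gpv_nomatch nm fb n _ hno]
        simp
    · have hno : ∀ i : Int, 0 ≤ i → i < n →
          fb.toList ≠ nm.toList ++ '_' :: PySem.Int.toChars i := by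
        intro i h0 hin hPi
        obtain ⟨-, hcg, -⟩ := (gpv_match_iff nm fb i h0).mp hPi
        exact hc hcg
      simp only [hs, hc, if_true]
      rw [gpv_nomatch nm fb n _ hno]
      simp
  · have hno : ∀ i : Int, 0 ≤ i → i < n →
        fb.toList ≠ nm.toList ++ '_' :: PySem.Int.toChars i := by
      intro i h0 hin hPi
      obtain ⟨hsg, -, -⟩ := (gpv_match_iff nm fb i h0).mp hPi
      exact hs hsg
    simp only [hs]
    rw [gpv_nomatch nm fb n _ hno]
    simp

-- ===== VERDICT (by name: the statement is the Claim_ definition above) =====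
theorem get_param_value_spec : Claim_equal_get_param_value := by
  intro nm n fb _
  unfold Spec_get_param_value
  exact gpv_final nm n fb
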